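-- pv_equiv track=rewrite | github.com/IlyaKalinovskiy/speechflow | speechflow/data_pipeline/datasample_processors/text_processors.py | _assign_ends_of_items
-- ===== SOURCE A (Python) =====
-- import typing as tp
-- import itertools
--
-- def _assign_ends_of_items(
--     lens: tp.List[int], in_symbol: str, end_symbol: str
-- ) -> tp.List[tp.Any]:
--     """For every phoneme assign `end_symbol` if phoneme is in the end of an item, else
--     `in_symbol`.
--
--     Parameters
--     ----------
--     lens : array-like
--         contains lengths of every item in a sequence.
--
--     """
--     res = [
--         [in_symbol] * max((length - 1), 0) + ([end_symbol] if length > 0 else [])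
--         for length in lens
--     ]
--     return list(itertools.chain.from_iterable(res))
-- ===== SOURCE B (Python) =====
-- def _assign_ends_of_items(lens, in_symbol, end_symbol):
--     total = sum(L for L in lens if L > 0)
--     res = [in_symbol] * total
--     offset = 0
--     for L in lens:
--         if L > 0:
--             res[offset + L - 1] = end_symbol
--             offset += L
--     return res
-- ===== Notes on version B (the rewrite author's own statement) =====
-- stated objective: alternative
-- what changed: Instead of building a per-item sublist for every length and chaining them, B allocates the whole output as [in_symbol]*total once and marks each item's last position with end_symbol in place while tracking a running offset.
import Mathlib
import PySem

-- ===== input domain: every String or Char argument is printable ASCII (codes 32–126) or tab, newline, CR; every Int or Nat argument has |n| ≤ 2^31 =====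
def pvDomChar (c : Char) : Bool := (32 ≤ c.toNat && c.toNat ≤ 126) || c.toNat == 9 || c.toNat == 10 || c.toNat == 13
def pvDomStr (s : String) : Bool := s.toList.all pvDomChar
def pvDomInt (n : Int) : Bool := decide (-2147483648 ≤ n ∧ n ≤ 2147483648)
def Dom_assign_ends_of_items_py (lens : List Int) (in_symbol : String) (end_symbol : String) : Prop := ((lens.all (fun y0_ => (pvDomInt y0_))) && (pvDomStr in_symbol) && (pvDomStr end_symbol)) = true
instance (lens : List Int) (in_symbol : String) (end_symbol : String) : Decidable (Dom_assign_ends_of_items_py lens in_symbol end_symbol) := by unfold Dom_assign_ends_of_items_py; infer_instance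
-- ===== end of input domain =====

-- B replaces A's per-item sublists + chain with a single preallocated [in_symbol]*total
-- buffer whose end positions are marked in place (objective: alternative decomposition).

-- ===== PORT A =====
-- res = [[in]*max(length-1,0) + ([end] if length>0 else []) for length in lens]; chain.from_iterable
def assign_ends_of_items_py (lens : List Int) (in_symbol : String) (end_symbol : String) : List String :=
  let res := lens.map (fun length =>
    List.replicate (max (length - 1) 0).toNat in_symbol ++
      (if length > 0 then [end_symbol] else []))
  res.flatten

-- ===== PORT B =====
-- the for-loop of Source B: state is (offset, res); res[offset+L-1] = end_symbol when L > 0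
def pvAltLoop (lens : List Int) (offset : Int) (res : List String) (end_symbol : String) : List String :=
  match lens with
  | [] => res
  | L :: rest =>
    if L > 0 then
      pvAltLoop rest (offset + L) (res.set (offset + L - 1).toNat end_symbol) end_symbol
    else
      pvAltLoop rest offset res end_symbol

def assign_ends_of_items_py_alt (lens : List Int) (in_symbol : String) (end_symbol : String) : List String :=
  let total := lens.foldl (fun s L => if L > 0 then s + L else s) (0 : Int)
  pvAltLoop lens 0 (List.replicate total.toNat in_symbol) end_symbol

-- ===== PRECONDITION & SPEC =====
def Spec_assign_ends_of_items_py (lens : List Int) (in_symbol : String) (end_symbol : String) (out : List String) : Prop := out = assign_ends_of_items_py_alt lens in_symbol end_symbol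
instance (lens : List Int) (in_symbol : String) (end_symbol : String) (out : List String) : Decidable (Spec_assign_ends_of_items_py lens in_symbol end_symbol out) := by unfold Spec_assign_ends_of_items_py; infer_instance

-- ===== CLAIM (what is proved, stated in full; the proofs are below) =====
def Claim_equal_assign_ends_of_items_py : Prop := ∀ (lens : List Int) (in_symbol : String) (end_symbol : String), Dom_assign_ends_of_items_py lens in_symbol end_symbol → Spec_assign_ends_of_items_py lens in_symbol end_symbol (assign_ends_of_items_py lens in_symbol end_symbol)

-- ===== LEMMAS AND PROOFS =====

-- sum of the positive entries, in recursive form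
def pvPosSum (lens : List Int) : Int :=
  match lens with
  | [] => 0
  | L :: rest => (if L > 0 then L else 0) + pvPosSum rest

lemma pvPosSum_nonneg (lens : List Int) : 0 ≤ pvPosSum lens := by
  induction lens with
  | nil => simp [pvPosSum]
  | cons L rest ih => simp only [pvPosSum]; split_ifs with h <;> omega

lemma pvFoldl_posSum (lens : List Int) (a : Int) :
    lens.foldl (fun s L => if L > 0 then s + L else s) a = a + pvPosSum lens := by
  induction lens generalizing a with
  | nil => simp [pvPosSum]
  | cons L rest ih =>
    simp only [List.foldl_cons, pvPosSum]
    split_ifs with h <;> rw [ih] <;> ring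


-- setting the element just past p overwrites the head of the suffix
lemma pvSetMid (p r : List String) (a b : String) (i : Nat) (hi : i = p.length) :
    (p ++ ([a] ++ r)).set i b = p ++ ([b] ++ r) := by
  subst hi
  rw [List.set_append_right _ _ (le_refl _)]
  simp

-- the main invariant: running the loop at offset = |p| on p ++ [in]*posSum produces p ++ A's flatten
lemma pvAltLoop_invariant (lens : List Int) (p : List String) (in_symbol end_symbol : String) :
    pvAltLoop lens (p.length : Int) (p ++ List.replicate (pvPosSum lens).toNat in_symbol) end_symbol
      = p ++ (lens.map (fun length =>
          List.replicate (max (length - 1) 0).toNat in_symbol ++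
            (if length > 0 then [end_symbol] else []))).flatten := by
  induction lens generalizing p with
  | nil => simp [pvAltLoop, pvPosSum]
  | cons L rest ih =>
    by_cases h : L > 0
    · have hrest := pvPosSum_nonneg rest
      have hsplit : (pvPosSum (L :: rest)).toNat = ((L - 1).toNat + 1) + (pvPosSum rest).toNat := by
        simp only [pvPosSum, if_pos h]; omega
      have hrep : List.replicate (pvPosSum (L :: rest)).toNat in_symbol
          = (List.replicate (L - 1).toNat in_symbol ++ [in_symbol]) ++ List.replicate (pvPosSum rest).toNat in_symbol := by
        rw [hsplit, ← List.replicate_succ', List.replicate_add]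
      have hidx : ((p.length : Int) + L - 1).toNat = p.length + (L - 1).toNat := by omega
      have hset : (p ++ List.replicate (pvPosSum (L :: rest)).toNat in_symbol).set
            ((p.length : Int) + L - 1).toNat end_symbol
          = (p ++ List.replicate (L - 1).toNat in_symbol)
              ++ ([end_symbol] ++ List.replicate (pvPosSum rest).toNat in_symbol) := by
        rw [hrep, hidx,
          show p ++ (List.replicate (L - 1).toNat in_symbol ++ [in_symbol]
              ++ List.replicate (pvPosSum rest).toNat in_symbol)
            = (p ++ List.replicate (L - 1).toNat in_symbol)
              ++ ([in_symbol] ++ List.replicate (pvPosSum rest).toNat in_symbol) from by simp]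
        rw [pvSetMid _ _ _ _ _ (by simp)]
      have harg : ((p.length : Int) + L)
          = (((p ++ List.replicate (L - 1).toNat in_symbol ++ [end_symbol]).length : Nat) : Int) := by
        simp; omega
      simp only [pvAltLoop, if_pos h]
      rw [hset,
        show (p ++ List.replicate (L - 1).toNat in_symbol)
            ++ ([end_symbol] ++ List.replicate (pvPosSum rest).toNat in_symbol)
          = (p ++ List.replicate (L - 1).toNat in_symbol ++ [end_symbol])
            ++ List.replicate (pvPosSum rest).toNat in_symbol from by simp,
        harg, ih (p ++ List.replicate (L - 1).toNat in_symbol ++ [end_symbol])]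
      simp only [List.map_cons, List.flatten_cons, if_pos h]
      have hmax : (max (L - 1) 0).toNat = (L - 1).toNat := by omega
      simp [hmax, List.append_assoc]
    · have hps : pvPosSum (L :: rest) = pvPosSum rest := by
        simp only [pvPosSum, if_neg h]; ring
      simp only [pvAltLoop, if_neg h, hps]
      rw [ih p]
      simp only [List.map_cons, List.flatten_cons, if_neg h]
      have hmax : (max (L - 1) 0).toNat = 0 := by omega
      simp [hmax]

-- ===== VERDICT (by name: the statement is the Claim_ definition above) =====
theorem assign_ends_of_items_py_spec : Claim_equal_assign_ends_of_items_py := by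
  intro lens in_symbol end_symbol _
  unfold Spec_assign_ends_of_items_py assign_ends_of_items_py assign_ends_of_items_py_alt
  rw [pvFoldl_posSum, zero_add]
  have := pvAltLoop_invariant lens [] in_symbol end_symbol
  simpa using this.symm
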